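-- pv_equiv track=rewrite | github.com/greemlin/piclock2 | main.py | is_dst
-- ===== SOURCE A (Python) =====
-- def day_of_week(year, month, day):
--     """
--     Calculate the day of the week using Zeller's Congruence.
--     Returns:
--         0 = Sunday, 1 = Monday, ..., 6 = Saturday
--     """
--     if month < 3:
--         month += 12
--         year -= 1
--     q = day
--     m = month
--     K = year % 100
--     J = year // 100
--     h = (q + (13 * (m + 1)) // 5 + K + (K // 4) + (J // 4) + 5 * J) % 7
--     day_week = (h + 6) % 7  # Convert to 0=Sunday, ..., 6=Saturday
--     return day_week
--
-- def is_dst(year, month, day, hour):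
--     """
--     Determine if Daylight Saving Time (DST) is in effect for Greece.
--     Args:
--         year (int): Current year
--         month (int): Current month
--         day (int): Current day
--         hour (int): Current hour (24-hour format)
--     Returns:
--         bool: True if DST is active, False otherwise
--     """
--     # Find the last Sunday in March
--     march_last_day = 31
--     while march_last_day >= 25:
--         dow = day_of_week(year, 3, march_last_day)
--         if dow == 0:  # Sunday
--             break
--         march_last_day -= 1
--
--     # Find the last Sunday in October
--     october_last_day = 31
--     while october_last_day >= 25:
--         dow = day_of_week(year, 10, october_last_day)
--         if dow == 0:  # Sunday
--             break
--         october_last_day -= 1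
--
--     # DST starts at 3:00 AM on the last Sunday in March
--     if month > 3 and month < 10:
--         return True
--     elif month == 3:
--         if day > march_last_day:
--             return True
--         elif day == march_last_day and hour >= 3:
--             return True
--         else:
--             return False
--     elif month == 10:
--         if day < october_last_day:
--             return True
--         elif day == october_last_day and hour < 4:
--             return True
--         else:
--             return False
--     else:
--         return False
-- ===== SOURCE B (Python) =====
-- def day_of_week(year, month, day):
--     """Zeller's Congruence; 0 = Sunday ... 6 = Saturday."""
--     if month < 3:
--         month += 12
--         year -= 1
--     q = day
--     m = month
--     K = year % 100
--     J = year // 100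
--     h = (q + (13 * (m + 1)) // 5 + K + (K // 4) + (J // 4) + 5 * J) % 7
--     return (h + 6) % 7
--
-- def is_dst(year, month, day, hour):
--     # Last Sunday of a 31-day month is 31 minus the weekday of the 31st.
--     march_last = 31 - day_of_week(year, 3, 31)
--     october_last = 31 - day_of_week(year, 10, 31)
--     return (3, march_last, 3) <= (month, day, hour) < (10, october_last, 4)
-- ===== Notes on version B (the rewrite author's own statement) =====
-- stated objective: simpler
-- what changed: B replaces the two descending while-loops that search for the last Sundays with the closed formula 31 - day_of_week(year, month, 31), and collapses the whole month/day/hour if-elif ladder into a single lexicographic tuple range test (3, march_last, 3) <= (month, day, hour) < (10, october_last, 4).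
import Mathlib
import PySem

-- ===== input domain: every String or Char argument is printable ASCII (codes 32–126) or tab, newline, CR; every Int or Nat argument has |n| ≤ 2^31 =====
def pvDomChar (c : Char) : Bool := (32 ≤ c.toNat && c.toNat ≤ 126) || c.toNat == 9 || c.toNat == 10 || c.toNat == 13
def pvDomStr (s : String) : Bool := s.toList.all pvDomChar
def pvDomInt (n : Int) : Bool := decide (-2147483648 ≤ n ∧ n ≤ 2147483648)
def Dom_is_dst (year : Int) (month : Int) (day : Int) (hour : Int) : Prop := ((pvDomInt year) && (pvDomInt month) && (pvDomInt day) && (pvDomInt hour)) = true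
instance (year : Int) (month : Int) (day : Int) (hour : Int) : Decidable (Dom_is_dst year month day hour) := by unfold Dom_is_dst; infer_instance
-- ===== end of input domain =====

-- ===== PORT A =====
-- B replaces A's two descending search loops with the direct formula 31 - weekday(31st)
-- and the month/day/hour if-ladder with one lexicographic triple range test (objective: simpler).
def day_of_week (year : Int) (month : Int) (day : Int) : Int :=
  let (year, month) := if month < 3 then (year - 1, month + 12) else (year, month)
  let q := day
  let m := month
  let K := PySem.Int.mod year 100
  let J := PySem.Int.floordiv year 100
  let h := PySem.Int.mod (q + PySem.Int.floordiv (13 * (m + 1)) 5 + K + PySem.Int.floordiv K 4 + PySem.Int.floordiv J 4 + 5 * J) 7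
  PySem.Int.mod (h + 6) 7

-- A's 'while last_day >= 25: if Sunday break; last_day -= 1' loop (fuel 8 covers days 31..24)
def lastSundayLoop (year : Int) (month : Int) (d : Int) : Nat → Int
  | 0 => d
  | fuel + 1 =>
    if d ≥ 25 then
      if day_of_week year month d == 0 then d else lastSundayLoop year month (d - 1) fuel
    else d

def is_dst (year : Int) (month : Int) (day : Int) (hour : Int) : Bool :=
  let march_last_day := lastSundayLoop year 3 31 8
  let october_last_day := lastSundayLoop year 10 31 8
  if month > 3 && month < 10 then true
  else if month == 3 then
    if day > march_last_day then true
    else if day == march_last_day && hour ≥ 3 then true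
    else false
  else if month == 10 then
    if day < october_last_day then true
    else if day == october_last_day && hour < 4 then true
    else false
  else false

-- ===== PORT B =====
-- Python tuple comparisons (3-tuples, lexicographic), ported by hand (exact)
def tuple3_le (a b : Int × Int × Int) : Bool :=
  a.1 < b.1 || (a.1 == b.1 && (a.2.1 < b.2.1 || (a.2.1 == b.2.1 && a.2.2 ≤ b.2.2)))

def tuple3_lt (a b : Int × Int × Int) : Bool :=
  a.1 < b.1 || (a.1 == b.1 && (a.2.1 < b.2.1 || (a.2.1 == b.2.1 && a.2.2 < b.2.2)))

def is_dst_alt (year : Int) (month : Int) (day : Int) (hour : Int) : Bool :=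
  let march_last := 31 - day_of_week year 3 31
  let october_last := 31 - day_of_week year 10 31
  tuple3_le (3, march_last, 3) (month, day, hour) && tuple3_lt (month, day, hour) (10, october_last, 4)

-- ===== PRECONDITION & SPEC =====
def Spec_is_dst (year : Int) (month : Int) (day : Int) (hour : Int) (out : Bool) : Prop := out = is_dst_alt year month day hour
instance (year : Int) (month : Int) (day : Int) (hour : Int) (out : Bool) : Decidable (Spec_is_dst year month day hour out) := by unfold Spec_is_dst; infer_instance

-- ===== CLAIM (what is proved, stated in full; the proofs are below) =====
def Claim_equal_is_dst : Prop := ∀ (year : Int) (month : Int) (day : Int) (hour : Int), Dom_is_dst year month day hour → Spec_is_dst year month day hour (is_dst year month day hour)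

-- ===== LEMMAS AND PROOFS =====

theorem mod7 (a : Int) : PySem.Int.mod a 7 = a % 7 :=
  PySem.Int.mod_eq_emod_of_pos (by norm_num)

theorem mod100 (a : Int) : PySem.Int.mod a 100 = a % 100 :=
  PySem.Int.mod_eq_emod_of_pos (by norm_num)

-- For months ≥ 3 the weekday is linear in the day: dow(y,m,31-i) = (dow(y,m,31) - i) mod 7.
theorem dow_shift (year : Int) (month : Int) (hm : 3 ≤ month) (i : Int) :
    day_of_week year month (31 - i) = (day_of_week year month 31 - i) % 7 := by
  unfold day_of_week
  have hnm : ¬ month < 3 := by omega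
  simp only [hnm, if_false, mod7, mod100]
  generalize PySem.Int.floordiv (13 * (month + 1)) 5 = a
  generalize PySem.Int.floordiv (PySem.Int.mod year 100) 4 = b
  generalize PySem.Int.floordiv (PySem.Int.floordiv year 100) 4 = c
  generalize PySem.Int.mod year 100 = K
  generalize PySem.Int.floordiv year 100 = J
  omega

theorem dow_lb (year : Int) (month : Int) (day : Int) : 0 ≤ day_of_week year month day := by
  unfold day_of_week
  split <;> simp only [mod7] <;> omega

theorem dow_ub (year : Int) (month : Int) (day : Int) : day_of_week year month day < 7 := by
  unfold day_of_week
  split <;> simp only [mod7] <;> omega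

-- The descending search loop finds exactly 31 - dow(y,m,31).
set_option maxHeartbeats 1600000 in
theorem lastSundayLoop_eq (year : Int) (month : Int) (hm : 3 ≤ month) :
    lastSundayLoop year month 31 8 = 31 - day_of_week year month 31 := by
  have h1 := dow_shift year month hm 1
  have h2 := dow_shift year month hm 2
  have h3 := dow_shift year month hm 3
  have h4 := dow_shift year month hm 4
  have h5 := dow_shift year month hm 5
  have h6 := dow_shift year month hm 6
  norm_num at h1 h2 h3 h4 h5 h6
  have hlb := dow_lb year month 31
  have hub := dow_ub year month 31
  generalize hg : day_of_week year month 31 = w at h1 h2 h3 h4 h5 h6 hlb hub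
  interval_cases w <;>
    first
      | (norm_num at h1 h2 h3 h4 h5 h6
         simp only [lastSundayLoop]
         norm_num [hg, h1, h2, h3, h4, h5, h6])
      | (simp only [lastSundayLoop]
         norm_num [hg, h1, h2, h3, h4, h5, h6])

-- ===== VERDICT (by name: the statement is the Claim_ definition above) =====
theorem is_dst_spec : Claim_equal_is_dst := by
  intro year month day hour _
  unfold Spec_is_dst is_dst is_dst_alt tuple3_le tuple3_lt
  rw [lastSundayLoop_eq year 3 (by norm_num), lastSundayLoop_eq year 10 (by norm_num)]
  have hm1 := dow_lb year 3 31
  have hm2 := dow_ub year 3 31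
  have ho1 := dow_lb year 10 31
  have ho2 := dow_ub year 10 31
  generalize day_of_week year 3 31 = wm at *
  generalize day_of_week year 10 31 = wo at *
  simp only []
  split_ifs <;> simp_all <;> try omega
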